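-- pv_equiv track=rewrite | github.com/neizod/problems | aoc/2015/p11-2.py | fast_skip
-- ===== SOURCE A (Python) =====
-- def get_vector(value):
--     vector = []
--     while value:
--         vector += [value%26]
--         value //= 26
--     return vector
--
-- def fast_skip(value):
--     vector = get_vector(value)
--     for i, v in reversed(list(enumerate(vector))):
--         if v in {ord(i)-97 for i in 'iol'}:
--             vector[i] += 1
--             vector[:i] = [0]*len(vector[:i])
--             break
--     return vector
-- ===== SOURCE B (Python) =====
-- def fast_skip(value):
--     # Arithmetic round-up instead of list surgery: find p = 26**t for the most
--     # significant i/o/l digit, replace value by (value // p + 1) * p (this bumps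
--     # that digit and zeroes everything below, no carry since the digit <= 14),
--     # then convert the adjusted number to base-26 digits in one fresh pass.
--     v, p, pw = value, 1, None
--     while v:
--         if v % 26 in (8, 11, 14):
--             pw = p
--         v //= 26
--         p *= 26
--     if pw is not None:
--         value = (value // pw + 1) * pw
--     digits = []
--     while value:
--         digits.append(value % 26)
--         value //= 26
--     return digits
-- ===== Notes on version B (the rewrite author's own statement) =====
-- stated objective: alternative
-- what changed: B replaces A's digit-vector surgery (reversed enumerate scan, element increment, slice-assignment of zeros) by pure integer arithmetic: it finds p = 26**t for the most significant i/o/l digit, rounds the number up to (value//p + 1)*p, and converts the adjusted number to base-26 digits in one fresh pass.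
import Mathlib
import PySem

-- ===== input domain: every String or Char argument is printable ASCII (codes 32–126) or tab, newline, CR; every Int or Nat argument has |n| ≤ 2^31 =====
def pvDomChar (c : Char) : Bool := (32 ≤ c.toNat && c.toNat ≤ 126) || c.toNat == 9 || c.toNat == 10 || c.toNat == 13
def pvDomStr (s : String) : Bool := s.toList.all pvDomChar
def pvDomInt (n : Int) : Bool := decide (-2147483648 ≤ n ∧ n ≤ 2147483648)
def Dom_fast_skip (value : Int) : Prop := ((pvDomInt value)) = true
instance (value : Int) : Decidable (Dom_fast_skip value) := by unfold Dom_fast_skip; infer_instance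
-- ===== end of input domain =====

-- B replaces A's digit-vector surgery by integer arithmetic: round value up to
-- (value // 26^t + 1) * 26^t for the most significant i/o/l digit, then convert once
-- (objective: alternative).

-- ===== PORT A =====
-- digit test v in {ord(i)-97 for i in 'iol'} = {8, 11, 14}
def pvMatch (d : Int) : Bool := d == 8 || d == 11 || d == 14

-- while value: vector += [value%26]; value //= 26   (recursion on the Nat value; for
-- value < 0 the Python loop diverges, which Pre_ excludes; Int %,// on nonnegatives = Nat ops)
def pvGetVector : Nat → List Int
  | 0 => []
  | n+1 => (((n+1 : Nat) : Int) % 26) :: pvGetVector ((n+1)/26)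
decreasing_by exact Nat.div_lt_self (Nat.succ_pos n) (by norm_num)

-- list(enumerate(vector)) starting at index i
def pvEnumFrom (i : Nat) : List Int → List (Nat × Int)
  | [] => []
  | d :: rest => (i, d) :: pvEnumFrom (i+1) rest

-- the for-loop with break over the reversed enumerated list:
-- vector[i] += 1; vector[:i] = [0]*i; break
def pvScanRev (vector : List Int) : List (Nat × Int) → List Int
  | [] => vector
  | (i, v) :: rest =>
      if pvMatch v then List.replicate i 0 ++ (vector.set i (v+1)).drop i
      else pvScanRev vector rest

def fast_skip (value : Int) : List Int :=
  let vector := pvGetVector value.toNat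
  pvScanRev vector ((pvEnumFrom 0 vector).reverse)

-- ===== PORT B =====
-- Source B's first loop: v //= 26, p *= 26, pw := p at each i/o/l digit (latest wins)
def pvFindPow : Nat → Int → Option Int → Option Int
  | 0, _, pw => pw
  | n+1, p, pw =>
      pvFindPow ((n+1)/26) (p*26) (if pvMatch (((n+1 : Nat) : Int) % 26) then some p else pw)
decreasing_by exact Nat.div_lt_self (Nat.succ_pos n) (by norm_num)

-- Source B's second loop: digits.append(value % 26); value //= 26
def pvDigits : Nat → List Int
  | 0 => []
  | n+1 => (((n+1 : Nat) : Int) % 26) :: pvDigits ((n+1)/26)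
decreasing_by exact Nat.div_lt_self (Nat.succ_pos n) (by norm_num)

def fast_skip_alt (value : Int) : List Int :=
  match pvFindPow value.toNat 1 none with
  | some p => pvDigits ((PySem.Int.floordiv value p + 1) * p).toNat
  | none => pvDigits value.toNat

-- ===== PRECONDITION & SPEC =====
-- Pre_ excludes value < 0, on which A's while loop never terminates (value //= 26 gets stuck at -1).
def Pre_fast_skip (value : Int) : Prop := 0 ≤ value
instance (value : Int) : Decidable (Pre_fast_skip value) := by unfold Pre_fast_skip; infer_instance
def pvWitness_fast_skip : Int := 123456

def Spec_fast_skip (value : Int) (out : List Int) : Prop := out = fast_skip_alt value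
instance (value : Int) (out : List Int) : Decidable (Spec_fast_skip value out) := by unfold Spec_fast_skip; infer_instance

-- ===== CLAIM =====
def Claim_equal_fast_skip : Prop := ∀ (value : Int), Dom_fast_skip value → Pre_fast_skip value → Spec_fast_skip value (fast_skip value)

-- ===== LEMMAS AND PROOFS =====

-- index of the last (= most significant) matching digit of a digit list
def pvLastMatch? : List Int → Option Nat
  | [] => none
  | d :: rest =>
      match pvLastMatch? rest with
      | some j => some (j+1)
      | none => if pvMatch d then some 0 else none

theorem pvDigits_eq (n : Nat) : pvDigits n = pvGetVector n := by
  induction n using Nat.strong_induction_on with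
  | _ n ih =>
    match n with
    | 0 => simp [pvDigits, pvGetVector]
    | Nat.succ m =>
      rw [pvDigits, pvGetVector, ih ((m+1)/26) (Nat.div_lt_self (Nat.succ_pos m) (by norm_num))]

theorem pvGetVector_pos (n : Nat) (h : 0 < n) :
    pvGetVector n = ((n % 26 : Nat) : Int) :: pvGetVector (n / 26) := by
  match n with
  | Nat.succ m =>
    rw [pvGetVector]
    congr 1

theorem pvFindPow_eq (n : Nat) : ∀ (p : Int) (pw : Option Int),
    pvFindPow n p pw =
      match pvLastMatch? (pvGetVector n) with
      | some j => some (p * 26 ^ j)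
      | none => pw := by
  induction n using Nat.strong_induction_on with
  | _ n ih =>
    intro p pw
    match n with
    | 0 => simp [pvFindPow, pvGetVector, pvLastMatch?]
    | Nat.succ m =>
      rw [pvFindPow, ih ((m+1)/26) (Nat.div_lt_self (Nat.succ_pos m) (by norm_num))]
      rw [pvGetVector, pvLastMatch?]
      cases h : pvLastMatch? (pvGetVector ((m+1)/26)) with
      | some j => simp [pow_succ]; ring
      | none =>
        by_cases hm : pvMatch (((m : Int) + 1) % 26) = true <;> simp [hm]

theorem pvScanRev_eq (vec : List Int) : ∀ (r : List (Nat × Int)),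
    pvScanRev vec r =
      match r.find? (fun p => pvMatch p.2) with
      | some (i, v) => List.replicate i 0 ++ (vec.set i (v+1)).drop i
      | none => vec := by
  intro r
  induction r with
  | nil => simp [pvScanRev]
  | cons p rest ih =>
    obtain ⟨i, v⟩ := p
    by_cases hm : pvMatch v <;> simp [pvScanRev, List.find?, hm, ih]

theorem pvFind_rev_enum (vec : List Int) : ∀ (i : Nat),
    (pvEnumFrom i vec).reverse.find? (fun p => pvMatch p.2) =
      match pvLastMatch? vec with
      | some j => some (i + j, vec.getD j 0)
      | none => none := by
  induction vec with
  | nil => intro i; simp [pvEnumFrom, pvLastMatch?]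
  | cons d rest ih =>
    intro i
    rw [pvEnumFrom]
    rw [List.reverse_cons, List.find?_append, ih (i+1), pvLastMatch?]
    cases h : pvLastMatch? rest with
    | some j => simp; omega
    | none => by_cases hm : pvMatch d <;> simp [List.find?, hm]

theorem pvLastMatch_lt : ∀ (vec : List Int) (j : Nat), pvLastMatch? vec = some j → j < vec.length := by
  intro vec
  induction vec with
  | nil => intro j h; simp [pvLastMatch?] at h
  | cons d rest ih =>
    intro j h
    rw [pvLastMatch?] at h
    cases hr : pvLastMatch? rest with
    | some k => rw [hr] at h; have := ih k hr; simp at h; simp [← h]; omega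
    | none =>
      rw [hr] at h
      by_cases hm : pvMatch d <;> simp [hm] at h
      simp [← h]

theorem pvLastMatch_match : ∀ (vec : List Int) (j : Nat),
    pvLastMatch? vec = some j → pvMatch (vec.getD j 0) = true := by
  intro vec
  induction vec with
  | nil => intro j h; simp [pvLastMatch?] at h
  | cons d rest ih =>
    intro j h
    rw [pvLastMatch?] at h
    cases hr : pvLastMatch? rest with
    | some k =>
      rw [hr] at h; simp at h
      subst h; simpa using ih k hr
    | none =>
      rw [hr] at h
      by_cases hm : pvMatch d <;> simp [hm] at h
      simp [← h, hm]

theorem pvDropSet : ∀ (vec : List Int) (j : Nat) (x : Int), j < vec.length →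
    (vec.set j x).drop j = x :: vec.drop (j+1) := by
  intro vec
  induction vec with
  | nil => intro j x h; simp at h
  | cons d rest ih =>
    intro j x h
    match j with
    | 0 => simp
    | Nat.succ k =>
      simp only [List.set_cons_succ, List.drop_succ_cons]
      exact ih k x (by simpa using h)

theorem pvGetVector_getD (n : Nat) : ∀ (j : Nat), j < (pvGetVector n).length →
    (pvGetVector n).getD j 0 = ((n / 26 ^ j % 26 : Nat) : Int) := by
  induction n using Nat.strong_induction_on with
  | _ n ih =>
    intro j hj
    match n with
    | 0 => simp [pvGetVector] at hj
    | Nat.succ m =>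
      rw [pvGetVector] at hj ⊢
      match j with
      | 0 => simp
      | Nat.succ k =>
        simp only [List.getD_cons_succ]
        rw [ih ((m+1)/26) (Nat.div_lt_self (Nat.succ_pos m) (by norm_num)) k (by simpa using hj)]
        rw [Nat.div_div_eq_div_mul, ← pow_succ']

theorem pvGetVector_drop (j : Nat) : ∀ (n : Nat),
    (pvGetVector n).drop j = pvGetVector (n / 26 ^ j) := by
  induction j with
  | zero => intro n; simp
  | succ k ih =>
    intro n
    have h1 : (pvGetVector n).drop 1 = pvGetVector (n / 26) := by
      match n with
      | 0 => simp [pvGetVector]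
      | Nat.succ m => rw [pvGetVector]; simp
    rw [show k + 1 = 1 + k by omega, ← List.drop_drop, h1, ih (n / 26),
        Nat.div_div_eq_div_mul, ← pow_succ', Nat.add_comm 1 k]

theorem pvGetVector_mul_pow (t : Nat) : ∀ (m : Nat), m % 26 ≠ 0 →
    pvGetVector (m * 26 ^ t) = List.replicate t 0 ++ pvGetVector m := by
  induction t with
  | zero => intro m _; simp
  | succ k ih =>
    intro m hm
    have hmpos : 0 < m := by omega
    have hk : 0 < m * 26 ^ (k+1) := by positivity
    rw [pvGetVector_pos _ hk]
    have h26 : m * 26 ^ (k+1) = (m * 26 ^ k) * 26 := by ring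
    have hmod : (m * 26 ^ (k+1)) % 26 = 0 := by rw [h26]; exact Nat.mul_mod_left _ _
    have hdiv : (m * 26 ^ (k+1)) / 26 = m * 26 ^ k := by rw [h26]; exact Nat.mul_div_cancel _ (by norm_num)
    rw [hmod, hdiv, ih m hm]
    simp [List.replicate_succ]

-- ===== VERDICT =====
theorem fast_skip_spec : Claim_equal_fast_skip := by
  intro value _ hpre
  unfold Spec_fast_skip fast_skip fast_skip_alt
  rw [pvScanRev_eq, pvFind_rev_enum, pvFindPow_eq]
  set n := value.toNat with hn
  have hval : (n : Int) = value := Int.toNat_of_nonneg hpre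
  cases h : pvLastMatch? (pvGetVector n) with
  | none => simp [pvDigits_eq]
  | some t =>
    have ht : t < (pvGetVector n).length := pvLastMatch_lt _ t h
    have hmt : pvMatch ((pvGetVector n).getD t 0) = true := pvLastMatch_match _ t h
    rw [pvGetVector_getD n t ht] at hmt
    set d : Nat := n / 26 ^ t % 26 with hd
    have hdle : d ≤ 24 := by
      simp [pvMatch] at hmt
      omega
    simp only [Nat.zero_add]
    rw [pvDropSet _ t _ ht, pvGetVector_getD n t ht, pvGetVector_drop]
    -- B side: compute the rounded-up number
    have hfd : PySem.Int.floordiv value ((1 : Int) * 26 ^ t) = ((n / 26 ^ t : Nat) : Int) := by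
      rw [one_mul, ← hval, show ((26 : Int) ^ t) = ((26 ^ t : Nat) : Int) by push_cast; ring]
      exact PySem.Int.floordiv_natCast n (26 ^ t)
    rw [hfd]
    have hcast : ((((n / 26 ^ t : Nat) : Int) + 1) * ((1:Int) * 26 ^ t)) = (((n / 26 ^ t + 1) * 26 ^ t : Nat) : Int) := by
      push_cast; ring
    rw [hcast, Int.toNat_natCast, pvDigits_eq]
    -- digits of the rounded-up number
    have hq : n / 26 ^ t / 26 = n / 26 ^ (t+1) := by
      rw [Nat.div_div_eq_div_mul, ← pow_succ]
    have hm26 : (n / 26 ^ t + 1) % 26 = d + 1 := by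
      have h1 : n / 26 ^ t = 26 * (n / 26 ^ t / 26) + d := (Nat.div_add_mod _ 26).symm
      omega
    have hdiv26 : (n / 26 ^ t + 1) / 26 = n / 26 ^ (t+1) := by
      have h1 : n / 26 ^ t = 26 * (n / 26 ^ t / 26) + d := (Nat.div_add_mod _ 26).symm
      omega
    rw [pvGetVector_mul_pow t (n / 26 ^ t + 1) (by omega),
        pvGetVector_pos (n / 26 ^ t + 1) (Nat.succ_pos _), hm26, hdiv26, hd]
    push_cast
    ring_nf
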